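-- pv_equiv track=rewrite | github.com/E-denu/Abbreviation_generator | Denu_Preprocessing.py | smallscore_ManywordName
-- ===== SOURCE A (Python) =====
-- letter_score = {
-- 'A':25, 'B':8, 'C':8, 'D': 9, 'E':35, 'F':7, 'G':9, 'H':7, 'I':25, 'J':3,
-- 'K':6, 'L':15, 'M':8, 'N':15, 'O':20, 'P':8, 'Q':1, 'R':15, 'S':15, 'T':15,
-- 'U':20, 'V':7, 'W':7, 'X':3, 'Y':7, 'Z':1}
--
-- def smallscore_ManywordName(str_name1):
--     '''The smallscore_ManyWordsName function is used to select small abbreviations with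
--     the least scores in names that contain more than one word'''
--     splitted = [*str_name1]
--     abb_dict = {}
--     for key,value in letter_score.items():
--         if key in splitted:
--             abb_dict[key] = value
--
--     list_keys = list(abb_dict.keys())
--     list_values = list(abb_dict.values())
--     numbers = []
--     for key in splitted[1:]:
--         numbers.append(abb_dict[key])
--     numbers.sort()
--
--     first_char = numbers[0]
--     first_value = list_values.index(first_char)
--     comb_char = list_keys[first_value]
--     return comb_char
-- ===== SOURCE B (Python) =====
-- letter_score = {
-- 'A':25, 'B':8, 'C':8, 'D': 9, 'E':35, 'F':7, 'G':9, 'H':7, 'I':25, 'J':3,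
-- 'K':6, 'L':15, 'M':8, 'N':15, 'O':20, 'P':8, 'Q':1, 'R':15, 'S':15, 'T':15,
-- 'U':20, 'V':7, 'W':7, 'X':3, 'Y':7, 'Z':1}
--
-- def smallscore_ManywordName(str_name1):
--     # single pass running-minimum over the rest of the name (IndexError/KeyError behaviour handled by Pre_)
--     best = None
--     for c in str_name1[1:]:
--         s = letter_score[c]
--         if best is None or s < best:
--             best = s
--     # single pass over the name keeping the alphabetically least letter scoring `best`
--     result = None
--     for c in str_name1:
--         if letter_score.get(c) == best and (result is None or c < result):
--             result = c
--     return result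
-- ===== Notes on version B (the rewrite author's own statement) =====
-- stated objective: alternative
-- what changed: B replaces A's staged pipeline (filter the score table into a dict, build a score list, sort it, then map the minimum back to a letter via parallel keys/values lists and .index) by two accumulator passes: a running-minimum scan over the rest of the name, then a scan over the name keeping the alphabetically least letter with that score; no dict, no list and no sort is built.
import Mathlib
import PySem

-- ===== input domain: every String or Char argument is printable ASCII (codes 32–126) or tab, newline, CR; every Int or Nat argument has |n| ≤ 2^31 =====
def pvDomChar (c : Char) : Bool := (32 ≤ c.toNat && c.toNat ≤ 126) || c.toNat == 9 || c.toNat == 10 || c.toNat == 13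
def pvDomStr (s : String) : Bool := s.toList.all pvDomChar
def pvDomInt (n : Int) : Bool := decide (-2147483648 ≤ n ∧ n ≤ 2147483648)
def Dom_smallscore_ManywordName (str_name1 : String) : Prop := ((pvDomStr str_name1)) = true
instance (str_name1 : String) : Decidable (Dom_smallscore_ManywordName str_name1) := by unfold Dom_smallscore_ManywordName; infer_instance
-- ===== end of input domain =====

-- B replaces A's dict/parallel-lists/sort pipeline by two accumulator passes over the name:
-- a running minimum of the rest-scores, then the alphabetically least letter scoring that minimum.


-- ===== PORT A =====
-- the module-level constant letter_score, in its literal (= alphabetical) insertion order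
def pvLetterScore : List (Char × Int) :=
  [('A',25), ('B',8), ('C',8), ('D',9), ('E',35), ('F',7), ('G',9), ('H',7), ('I',25), ('J',3),
   ('K',6), ('L',15), ('M',8), ('N',15), ('O',20), ('P',8), ('Q',1), ('R',15), ('S',15), ('T',15),
   ('U',20), ('V',7), ('W',7), ('X',3), ('Y',7), ('Z',1)]

def smallscore_ManywordName (str_name1 : String) : String :=
  let splitted := str_name1.toList
  let abb : PySem.Dict Char Int :=
    pvLetterScore.foldl (fun d kv => if splitted.contains kv.1 then d.insert kv.1 kv.2 else d)
      PySem.Dict.empty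
  let list_keys := abb.keys
  let list_values := abb.values
  -- abb_dict[key]: the KeyError case (get? = none) is excluded by Pre_, the .getD default is never used there
  let numbers : List Int :=
    (PySem.List.slice splitted (some 1) none).foldl (fun ns c => ns ++ [(abb.get? c).getD 0]) []
  let sortedNums := PySem.List.sorted numbers (fun x => x) false
  -- numbers[0]: the IndexError case is excluded by Pre_
  let first_char : Int := (PySem.List.pyGet? sortedNums 0).getD 0
  let first_value : Nat := (PySem.List.index? list_values first_char).getD 0
  let comb_char : Char := (PySem.List.pyGet? list_keys (first_value : Int)).getD ' '
  String.ofList [comb_char]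

-- ===== PORT B =====
-- letter_score[c] in its KeyError-total form: the default is never used under Pre_
def pvScore (c : Char) : Int := ((PySem.Dict.mk pvLetterScore).get? c).getD 0

def smallscore_ManywordName_alt (str_name1 : String) : String :=
  let chars := str_name1.toList
  -- first loop: running minimum of the scores of str_name1[1:]
  let best : Option Int :=
    (PySem.List.slice chars (some 1) none).foldl
      (fun b c => match b with
        | none => some (pvScore c)
        | some v => if pvScore c < v then some (pvScore c) else some v) none
  -- second loop: alphabetically least letter of the name whose table lookup equals best
  let result : Option Char :=
    chars.foldl
      (fun r c =>
        if ((PySem.Dict.mk pvLetterScore).get? c == best) &&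
           (match r with | none => true | some rc => decide (c < rc))
        then some c else r) none
  match result with
  | some c => String.ofList [c]
  | none => ""  -- the Python B returns None here; unreachable under Pre_

-- ===== PRECONDITION & SPEC =====
-- Pre_ excludes exactly the inputs on which A raises: names of length < 2 (IndexError on numbers[0])
-- and names with a character after the first that is not an uppercase letter (KeyError on abb_dict[key]).
def Pre_smallscore_ManywordName (str_name1 : String) : Prop :=
  2 ≤ str_name1.toList.length ∧
    (str_name1.toList.drop 1).all (fun c => decide ('A' ≤ c) && decide (c ≤ 'Z')) = true
instance (str_name1 : String) : Decidable (Pre_smallscore_ManywordName str_name1) := by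
  unfold Pre_smallscore_ManywordName; infer_instance

def pvWitness_smallscore_ManywordName : String := "QAZZ"

def Spec_smallscore_ManywordName (str_name1 : String) (out : String) : Prop := out = smallscore_ManywordName_alt str_name1
instance (str_name1 : String) (out : String) : Decidable (Spec_smallscore_ManywordName str_name1 out) := by unfold Spec_smallscore_ManywordName; infer_instance

-- ===== CLAIM (what is proved, stated in full; the proofs are below) =====
def Claim_equal_smallscore_ManywordName : Prop := ∀ (str_name1 : String), Dom_smallscore_ManywordName str_name1 → Pre_smallscore_ManywordName str_name1 → Spec_smallscore_ManywordName str_name1 (smallscore_ManywordName str_name1)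

-- ===== LEMMAS AND PROOFS =====

-- every uppercase letter is a key of the score table
lemma pv_upper_mem (c : Char) (h1 : 'A' ≤ c) (h2 : c ≤ 'Z') : c ∈ pvLetterScore.map Prod.fst := by
  have aux : ∀ n, 65 ≤ n → n ≤ 90 → Char.ofNat n ∈ pvLetterScore.map Prod.fst := by
    intro n hn1 hn2
    interval_cases n <;> decide
  have hb1 : 65 ≤ c.toNat := h1
  have hb2 : c.toNat ≤ 90 := h2
  rw [← Char.ofNat_toNat c]
  exact aux _ hb1 hb2

lemma pv_keys_nodup : (pvLetterScore.map Prod.fst).Nodup := by decide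

lemma pv_keys_sorted : pvLetterScore.Pairwise (fun a b => a.1 < b.1) := by decide

-- the conditional-insert loop over distinct fresh keys builds exactly the filtered list
lemma pv_foldl_ite_insert (L : List (Char × Int)) (p : Char → Bool) (d : PySem.Dict Char Int) :
    L.foldl (fun d kv => if p kv.1 then d.insert kv.1 kv.2 else d) d
      = (L.filter (fun kv => p kv.1)).foldl (fun d kv => d.insert kv.1 kv.2) d := by
  induction L generalizing d with
  | nil => rfl
  | cons x t ih =>
    simp only [List.foldl_cons, List.filter_cons]
    by_cases hp : p x.1 <;> simp [hp, ih]

-- find? by second component is indexing at the first index of that value among the second components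
lemma pv_find?_snd_eq_idx (F : List (Char × Int)) (m : Int) :
    F.find? (fun kv => kv.2 == m) = (List.idxOf? m (F.map Prod.snd)).bind (fun i => F[i]?) := by
  induction F with
  | nil => rfl
  | cons x t ih =>
    by_cases h : x.2 = m
    · simp [h, List.idxOf?_cons]
    · simp [h, List.idxOf?_cons, ih, Option.bind_map]

-- the first match of find? in a key-increasing pair list has the least key among matches
lemma pv_find?_min_key (l : List (Char × Int)) (p : Char × Int → Bool) (kv : Char × Int)
    (hpw : l.Pairwise (fun a b => a.1 < b.1)) (h : l.find? p = some kv) :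
    ∀ x ∈ l, p x = true → kv.1 ≤ x.1 := by
  induction l with
  | nil => simp at h
  | cons y t ih =>
    rcases List.pairwise_cons.1 hpw with ⟨hy, ht⟩
    by_cases hp : p y = true
    · rw [List.find?_cons_of_pos hp] at h
      cases h
      intro x hx _
      rcases List.mem_cons.1 hx with hx | hx
      · exact le_of_eq (by rw [hx])
      · exact le_of_lt (hy x hx)
    · rw [List.find?_cons_of_neg hp] at h
      intro x hx hpx
      rcases List.mem_cons.1 hx with hx | hx
      · exact absurd (hx ▸ hpx) hp
      · exact ih ht h x hx hpx

-- the running-minimum loop, started at a value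
lemma pv_minfold_some (l : List Char) (a : Int) :
    ∃ w, l.foldl (fun b c => match b with
        | none => some (pvScore c)
        | some v => if pvScore c < v then some (pvScore c) else some v) (some a) = some w ∧
      (w = a ∨ ∃ c ∈ l, pvScore c = w) ∧ w ≤ a ∧ ∀ c ∈ l, w ≤ pvScore c := by
  induction l generalizing a with
  | nil => exact ⟨a, rfl, Or.inl rfl, le_refl a, by simp⟩
  | cons x t ih =>
    by_cases hx : pvScore x < a
    · obtain ⟨w, hw, hmem, hle, hbd⟩ := ih (pvScore x)
      refine ⟨w, by simpa [hx] using hw, ?_, le_of_lt (lt_of_le_of_lt hle hx), ?_⟩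
      · rcases hmem with h | ⟨c, hc, hcw⟩
        · exact Or.inr ⟨x, List.mem_cons_self, h.symm⟩
        · exact Or.inr ⟨c, List.mem_cons_of_mem _ hc, hcw⟩
      · intro c hc
        rcases List.mem_cons.1 hc with hc | hc
        · exact hc ▸ hle
        · exact hbd c hc
    · obtain ⟨w, hw, hmem, hle, hbd⟩ := ih a
      refine ⟨w, by simpa [hx] using hw, ?_, hle, ?_⟩
      · rcases hmem with h | ⟨c, hc, hcw⟩
        · exact Or.inl h
        · exact Or.inr ⟨c, List.mem_cons_of_mem _ hc, hcw⟩
      · intro c hc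
        rcases List.mem_cons.1 hc with hc | hc
        · exact hc ▸ le_trans hle (le_of_not_gt hx)
        · exact hbd c hc

-- the least-letter loop, started at a letter
lemma pv_charfold_some (p : Char → Bool) (l : List Char) (a : Char) :
    ∃ c, l.foldl (fun r c =>
        if p c && (match r with | none => true | some rc => decide (c < rc))
        then some c else r) (some a) = some c ∧
      (c = a ∨ (c ∈ l ∧ p c = true)) ∧ c ≤ a ∧ ∀ b ∈ l, p b = true → c ≤ b := by
  induction l generalizing a with
  | nil => exact ⟨a, rfl, Or.inl rfl, le_refl a, by simp⟩
  | cons x t ih =>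
    by_cases hx : p x = true ∧ x < a
    · obtain ⟨c, hc, hmem, hle, hbd⟩ := ih x
      refine ⟨c, by simpa [hx.1, hx.2] using hc, ?_, le_of_lt (lt_of_le_of_lt hle hx.2), ?_⟩
      · rcases hmem with h | ⟨hcm, hpc⟩
        · subst h; exact Or.inr ⟨List.mem_cons_self, hx.1⟩
        · exact Or.inr ⟨List.mem_cons_of_mem _ hcm, hpc⟩
      · intro b hb hpb
        rcases List.mem_cons.1 hb with hb | hb
        · exact hb ▸ hle
        · exact hbd b hb hpb
    · obtain ⟨c, hc, hmem, hle, hbd⟩ := ih a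
      have hstep : (if p x && (match some a with | none => true | some rc => decide (x < rc))
          then some x else some a) = some a := by
        by_cases hp : p x = true
        · have hxa : ¬ x < a := fun h => hx ⟨hp, h⟩
          simp [hp, hxa]
        · simp [hp]
      refine ⟨c, by rw [List.foldl_cons, hstep]; exact hc, ?_, hle, ?_⟩
      · rcases hmem with h | ⟨hcm, hpc⟩
        · exact Or.inl h
        · exact Or.inr ⟨List.mem_cons_of_mem _ hcm, hpc⟩
      · intro b hb hpb
        rcases List.mem_cons.1 hb with hb | hb
        · subst hb
          have hba : ¬ b < a := fun h => hx ⟨hpb, h⟩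
          exact le_trans hle (le_of_not_gt hba)
        · exact hbd b hb hpb

-- the least-letter loop from the empty accumulator, given one match
lemma pv_charfold_none (p : Char → Bool) (l : List Char) (hex : ∃ c ∈ l, p c = true) :
    ∃ c, l.foldl (fun r c =>
        if p c && (match r with | none => true | some rc => decide (c < rc))
        then some c else r) none = some c ∧
      c ∈ l ∧ p c = true ∧ ∀ b ∈ l, p b = true → c ≤ b := by
  induction l with
  | nil => simp at hex
  | cons x t ih =>
    by_cases hp : p x = true
    · obtain ⟨c, hc, hmem, hle, hbd⟩ := pv_charfold_some p t x
      refine ⟨c, by simpa [hp] using hc, ?_, ?_, ?_⟩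
      · rcases hmem with h | ⟨hcm, _⟩
        · exact h ▸ List.mem_cons_self
        · exact List.mem_cons_of_mem _ hcm
      · rcases hmem with h | ⟨_, hpc⟩
        · exact h ▸ hp
        · exact hpc
      · intro b hb hpb
        rcases List.mem_cons.1 hb with hb | hb
        · exact hb ▸ hle
        · exact hbd b hb hpb
    · have hex' : ∃ c ∈ t, p c = true := by
        obtain ⟨c, hc, hpc⟩ := hex
        rcases List.mem_cons.1 hc with hc | hc
        · exact absurd (hc ▸ hpc) hp
        · exact ⟨c, hc, hpc⟩
      obtain ⟨c, hc, hcm, hpc, hbd⟩ := ih hex'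
      refine ⟨c, by simpa [hp] using hc, List.mem_cons_of_mem _ hcm, hpc, ?_⟩
      intro b hb hpb
      rcases List.mem_cons.1 hb with hb | hb
      · exact absurd (hb ▸ hpb) hp
      · exact hbd b hb hpb

-- ===== VERDICT (by name: the statement is the Claim_ definition above) =====
theorem smallscore_ManywordName_spec : Claim_equal_smallscore_ManywordName := by
  intro str_name1 _ hpre
  obtain ⟨hlen, hup0⟩ := hpre
  have hup : ∀ c ∈ str_name1.toList.drop 1, 'A' ≤ c ∧ c ≤ 'Z' := by simpa using hup0
  unfold Spec_smallscore_ManywordName smallscore_ManywordName smallscore_ManywordName_alt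
  simp only [PySem.List.slice_from_one]
  set s := str_name1.toList with hs
  set F : List (Char × Int) := pvLetterScore.filter (fun kv => s.contains kv.1) with hF
  have hFsub : F.Sublist pvLetterScore := List.filter_sublist
  have hFnodup : (F.map Prod.fst).Nodup := pv_keys_nodup.sublist (hFsub.map Prod.fst)
  have hFpw : F.Pairwise (fun a b => a.1 < b.1) := pv_keys_sorted.sublist hFsub
  set abb := pvLetterScore.foldl (fun d kv => if s.contains kv.1 then d.insert kv.1 kv.2 else d)
      PySem.Dict.empty with habbdef
  have habb : abb.items = F := by
    rw [habbdef, pv_foldl_ite_insert, ← hF]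
    have := PySem.Dict.items_foldl_insert_fresh (l := F) (k := Prod.fst) (v := Prod.snd)
      (d := PySem.Dict.empty) (fun a _ => by simp) hFnodup
    simpa using this
  have hkeys : abb.keys = F.map Prod.fst := by
    show abb.items.map Prod.fst = _ ; rw [habb]
  have hvals : abb.values = F.map Prod.snd := by
    show abb.items.map Prod.snd = _ ; rw [habb]
  -- lookups: for an uppercase c present in s, both dicts hold the same score
  have hentry : ∀ c ∈ s.tail, ∃ v, (c, v) ∈ pvLetterScore ∧ (c, v) ∈ F ∧
      abb.get? c = some v ∧ (PySem.Dict.mk pvLetterScore).get? c = some v := by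
    intro c hc
    have hcs : c ∈ s := List.mem_of_mem_tail hc
    have hcd : c ∈ s.drop 1 := by rw [List.drop_one]; exact hc
    obtain ⟨hu1, hu2⟩ := hup c hcd
    obtain ⟨⟨c', v⟩, hmem, hfst⟩ := List.mem_map.1 (pv_upper_mem c hu1 hu2)
    cases hfst
    have hcF : (c', v) ∈ F := List.mem_filter.2 ⟨hmem, by simpa using hcs⟩
    refine ⟨v, hmem, hcF, ?_, ?_⟩
    · exact PySem.Dict.get?_of_mem_items abb (habb ▸ hcF) (by rw [hkeys]; exact hFnodup)
    · exact PySem.Dict.get?_of_mem_items _ hmem pv_keys_nodup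
  -- A's numbers list equals the rest of the name mapped through the table lookup
  have hnum : s.tail.foldl (fun ns c => ns ++ [(abb.get? c).getD 0]) []
      = s.tail.map pvScore := by
    have hfold := PySem.List.foldl_append_singleton_eq_map
      (fun c => (abb.get? c).getD 0) s.tail []
    simp only [List.nil_append] at hfold
    rw [hfold]
    refine List.map_congr_left ?_
    intro c hc
    obtain ⟨v, _, _, ha, hb⟩ := hentry c hc
    rw [pvScore, ha, hb]
  rw [hnum]
  -- the rest of the name is nonempty
  have htne : s.tail ≠ [] := by
    intro h
    have := congrArg List.length h
    simp only [List.length_tail, List.length_nil] at this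
    omega
  -- A's side: the head m of the sorted score list is a minimum of the score list
  obtain ⟨m, t, hsort⟩ : ∃ m t,
      PySem.List.sorted (s.tail.map pvScore) (fun x => x) false = m :: t := by
    cases hx : PySem.List.sorted (s.tail.map pvScore) (fun x => x) false with
    | nil =>
      exact absurd (List.map_eq_nil_iff.mp ((PySem.List.sorted_eq_nil_iff _ _ _).1 hx)) htne
    | cons m t => exact ⟨m, t, rfl⟩
  have hmN : m ∈ s.tail.map pvScore :=
    (PySem.List.sorted_perm _ (fun x => x) false).mem_iff.1 (hsort ▸ List.mem_cons_self)
  have hmlb : ∀ y ∈ s.tail.map pvScore, m ≤ y :=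
    PySem.List.key_head_sorted_le _ (fun x => x) hsort
  rw [hsort, PySem.List.pyGet?_zero_cons]
  simp only [Option.getD_some]
  -- B's side, first loop: best = some m
  obtain ⟨c0, t0, ht0⟩ : ∃ c0 t0, s.tail = c0 :: t0 := by
    cases hx : s.tail with
    | nil => exact absurd hx htne
    | cons c0 t0 => exact ⟨c0, t0, rfl⟩
  have hbest : s.tail.foldl (fun b c => match b with
      | none => some (pvScore c)
      | some v => if pvScore c < v then some (pvScore c) else some v) none = some m := by
    rw [ht0, List.foldl_cons]
    obtain ⟨w, hw, hmem, hle, hbd⟩ := pv_minfold_some t0 (pvScore c0)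
    have hwN : w ∈ s.tail.map pvScore := by
      rcases hmem with h | ⟨c, hc, hcw⟩
      · exact h ▸ List.mem_map.2 ⟨c0, by rw [ht0]; exact List.mem_cons_self, rfl⟩
      · exact hcw ▸ List.mem_map.2 ⟨c, by rw [ht0]; exact List.mem_cons_of_mem _ hc, rfl⟩
    have hwlb : ∀ y ∈ s.tail.map pvScore, w ≤ y := by
      intro y hy
      obtain ⟨c, hc, hcy⟩ := List.mem_map.1 hy
      rw [ht0] at hc
      rcases List.mem_cons.1 hc with hc | hc
      · exact hcy ▸ hc ▸ hle
      · exact hcy ▸ hbd c hc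
    have : w = m := le_antisymm (hwlb m hmN) (hmlb w hwN)
    rw [show (match (none : Option Int) with
      | none => some (pvScore c0)
      | some v => if pvScore c0 < v then some (pvScore c0) else some v) = some (pvScore c0) from rfl]
    rw [hw, this]
  rw [hbest]
  -- A's side: the returned letter is the first key of F whose value is m
  have hmvals : m ∈ F.map Prod.snd := by
    obtain ⟨cm, hcm, hcms⟩ := List.mem_map.1 hmN
    obtain ⟨v, _, hvF, _, hb⟩ := hentry cm hcm
    have : v = m := by rw [pvScore, hb] at hcms; simpa using hcms
    exact this ▸ List.mem_map.2 ⟨(cm, v), hvF, rfl⟩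
  obtain ⟨i, hi⟩ := Option.isSome_iff_exists.mp
    ((PySem.List.index?_isSome_iff (xs := F.map Prod.snd) (v := m)).2 hmvals)
  obtain ⟨hk, hik, -⟩ := PySem.List.getElem_of_index?_eq_some hi
  have hkF : i < F.length := by simpa using hk
  rw [hkeys, hvals, hi]
  simp only [Option.getD_some]
  rw [PySem.List.pyGet?_natCast]
  have hfind : F.find? (fun kv => kv.2 == m) = some F[i] := by
    rw [pv_find?_snd_eq_idx, ← PySem.List.index?_eq_idxOf?, hi]
    simp [List.getElem?_eq_getElem hkF]
  have hFi2 : (F[i]).2 = m := by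
    have : (F.map Prod.snd)[i] = (F[i]).2 := by simp
    rw [← this]; exact hik
  -- B's side, second loop: it returns the least letter of s whose lookup is some m
  have hFi1s : (F[i]).1 ∈ s := by
    have hFiF : F[i] ∈ pvLetterScore.filter (fun kv => s.contains kv.1) := by
      rw [← hF]; exact List.getElem_mem hkF
    have := List.mem_filter.1 hFiF
    simpa using this.2
  have hFi1p : (PySem.Dict.mk pvLetterScore).get? (F[i]).1 = some m := by
    have hFiF : F[i] ∈ F := List.getElem_mem hkF
    have hFit : F[i] ∈ pvLetterScore := hFsub.mem hFiF
    have := PySem.Dict.get?_of_mem_items (PySem.Dict.mk pvLetterScore)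
      (k := (F[i]).1) (v := (F[i]).2) (by simpa using hFit) pv_keys_nodup
    rw [this, hFi2]
  have hex : ∃ c ∈ s, ((PySem.Dict.mk pvLetterScore).get? c == some m) = true :=
    ⟨(F[i]).1, hFi1s, by rw [hFi1p]; simp⟩
  obtain ⟨c, hc, hcm, hpc, hbd⟩ :=
    pv_charfold_none (fun c => (PySem.Dict.mk pvLetterScore).get? c == some m) s hex
  rw [hc]
  -- the two letters coincide: each is ≤ the other
  have hgc : (PySem.Dict.mk pvLetterScore).get? c = some m := by simpa using hpc
  have hcF : (c, m) ∈ F := by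
    have hct : (c, m) ∈ pvLetterScore := by
      simpa using PySem.Dict.mem_items_of_get?_eq_some _ hgc
    exact List.mem_filter.2 ⟨hct, by simpa using hcm⟩
  have h1 : (F[i]).1 ≤ c :=
    pv_find?_min_key F _ F[i] hFpw hfind (c, m) hcF (by simp)
  have h2 : c ≤ (F[i]).1 := hbd (F[i]).1 hFi1s (by rw [hFi1p]; simp)
  have hcc : c = (F[i]).1 := le_antisymm h2 h1
  have hkeyi : (F.map Prod.fst)[i]? = some (F[i]).1 := by
    simp [List.getElem?_eq_getElem hkF]
  rw [hkeyi]
  simp [hcc]
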